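-- pv_equiv track=rewrite | github.com/tscode-com-br/checking | alembic/versions/0018_add_checkinghistory_and_import_history_csv.py | _normalize_name_word
-- ===== SOURCE A (Python) =====
-- _NAME_CONNECTORS = {"de", "do", "da", "dos", "das", "e"}
--
-- def _normalize_name_word(value: str) -> str:
--     lowered = value.lower()
--     if lowered in _NAME_CONNECTORS:
--         return lowered
--     if not lowered:
--         return lowered
--     if "-" in lowered:
--         return "-".join(_normalize_name_word(part) for part in lowered.split("-"))
--     return lowered[:1].upper() + lowered[1:]
-- ===== SOURCE B (Python) =====
-- _NAME_CONNECTORS = {"de", "do", "da", "dos", "das", "e"}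
--
--
-- def _normalize_name_word(value: str) -> str:
--     lowered = value.lower()
--     if lowered in _NAME_CONNECTORS:
--         return lowered
--     if not lowered:
--         return lowered
--     out = []
--     for part in lowered.split("-"):
--         if not part or part in _NAME_CONNECTORS:
--             out.append(part)
--         else:
--             out.append(part[:1].upper() + part[1:])
--     return "-".join(out)
-- ===== Notes on version B (the rewrite author's own statement) =====
-- stated objective: simpler
-- what changed: Removes the recursive self-call: B splits the lowered string once on the hyphen separator and capitalizes each non-empty non-connector part in a single flat loop, then rejoins the parts.
import Mathlib
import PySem

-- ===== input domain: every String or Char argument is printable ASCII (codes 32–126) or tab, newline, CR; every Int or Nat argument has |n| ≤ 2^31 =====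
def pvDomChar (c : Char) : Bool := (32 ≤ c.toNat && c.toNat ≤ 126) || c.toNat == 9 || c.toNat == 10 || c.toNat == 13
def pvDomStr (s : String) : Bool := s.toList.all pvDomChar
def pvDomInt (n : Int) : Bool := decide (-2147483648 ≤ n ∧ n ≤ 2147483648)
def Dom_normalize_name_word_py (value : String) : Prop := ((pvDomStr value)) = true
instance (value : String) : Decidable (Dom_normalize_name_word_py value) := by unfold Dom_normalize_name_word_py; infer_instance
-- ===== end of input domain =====

-- B replaces A's recursive self-call with one flat pass over the hyphen-split parts (simpler decomposition); equivalence of return values is proved for all strings.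

-- ===== PORT A =====
-- the module constant _NAME_CONNECTORS, as the list of its (distinct) elements
def pvConnA : List (List Char) := [['d','e'],['d','o'],['d','a'],['d','o','s'],['d','a','s'],['e']]

-- helper definitions/lemmas cited by pvNormA's decreasing_by (termination of A's recursion)
def pvChunks : List Char → List Char → List (List Char)
  | pre, [] => [pre]
  | pre, c :: rest => if c = '-' then pre :: pvChunks [] rest else pvChunks (pre ++ [c]) rest

theorem pvGo_eq_chunks : ∀ (fuel : Nat) (l cur acc : List Char) (hacc : List (List Char)),
    l.length < fuel →
    PySem.Chars.splitOn.go ['-'] fuel l cur hacc = hacc.reverse ++ pvChunks cur.reverse l ∧ acc = acc := by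
  intro fuel
  induction fuel with
  | zero => intro l cur acc hacc h; omega
  | succ n ih =>
    intro l cur acc hacc h
    refine ⟨?_, rfl⟩
    cases l with
    | nil => simp [PySem.Chars.splitOn.go, pvChunks]
    | cons c rest =>
      by_cases hc : c = '-'
      · subst hc
        have h1 : (['-'] : List Char).isPrefixOf ('-' :: rest) = true := by simp [List.isPrefixOf]
        rw [PySem.Chars.splitOn.go]
        simp only [h1, if_true]
        have := (ih rest [] [] (cur.reverse :: hacc) (by simp at h ⊢; omega)).1
        simp only [List.length_cons, List.length_nil, List.drop_succ_cons, List.drop_zero] at this ⊢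
        rw [this]
        simp [pvChunks]
      · have h1 : (['-'] : List Char).isPrefixOf (c :: rest) = false := by
          simp [List.isPrefixOf]
          exact fun hx => hc hx.symm
        rw [PySem.Chars.splitOn.go]
        simp only [h1, Bool.false_eq_true, if_false]
        have := (ih rest (c :: cur) [] hacc (by simp at h ⊢; omega)).1
        rw [this]
        simp [pvChunks, hc]

theorem pvSplitOn_dash (l : List Char) : PySem.Chars.splitOn l ['-'] = pvChunks [] l := by
  unfold PySem.Chars.splitOn
  have := (pvGo_eq_chunks (l.length + 1) l [] [] [] (Nat.lt_succ_self _)).1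
  simpa using this

theorem pvChunks_mem : ∀ (l pre : List Char), '-' ∉ pre →
    ∀ p ∈ pvChunks pre l, '-' ∉ p ∧ ∀ c ∈ p, c ∈ pre ∨ c ∈ l := by
  intro l
  induction l with
  | nil =>
    intro pre hpre p hp
    simp [pvChunks] at hp
    subst hp
    exact ⟨hpre, fun c hc => Or.inl hc⟩
  | cons c rest ih =>
    intro pre hpre p hp
    by_cases hc : c = '-'
    · subst hc
      simp only [pvChunks, if_true] at hp
      rcases List.mem_cons.mp hp with h | h
      · subst h; exact ⟨hpre, fun x hx => Or.inl hx⟩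
      · have := ih [] (by simp) p h
        exact ⟨this.1, fun x hx => Or.inr (List.mem_cons_of_mem _ ((this.2 x hx).resolve_left (by simp)))⟩
    · simp only [pvChunks, hc, if_false] at hp
      have := ih (pre ++ [c]) (by simp [hpre]; exact fun h => absurd h.symm hc) p hp
      refine ⟨this.1, fun x hx => ?_⟩
      rcases this.2 x hx with h | h
      · rcases List.mem_append.mp h with h | h
        · exact Or.inl h
        · simp at h; subst h; exact Or.inr (List.mem_cons_self ..)
      · exact Or.inr (List.mem_cons_of_mem _ h)

theorem pvIsupper_iff (c : Char) : PySem.Chars.isupper c = true ↔ 65 ≤ c.toNat ∧ c.toNat ≤ 90 := by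
  simp only [PySem.Chars.isupper, Bool.and_eq_true, decide_eq_true_eq, Char.le_def,
    UInt32.le_iff_toNat_le]
  show 65 ≤ c.val.toNat ∧ _ ↔ _
  constructor <;> exact fun h => h

theorem pvLowerChar_fix (c : Char) (h : PySem.Chars.isupper c = false) :
    PySem.Chars.lowerChar c = c := by
  simp [PySem.Chars.lowerChar, h]

theorem pvToNat_lowerChar_upper (c : Char) (h : PySem.Chars.isupper c = true) :
    (PySem.Chars.lowerChar c).toNat = c.toNat + 32 := by
  simp only [PySem.Chars.lowerChar, h, if_true]
  have h2 := (pvIsupper_iff c).mp h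
  rw [Char.toNat_ofNat]
  have : (c.toNat + 32).isValidChar := by constructor; omega
  simp [this]

theorem pvLowerChar_eq_dash_iff (c : Char) : PySem.Chars.lowerChar c = '-' ↔ c = '-' := by
  constructor
  · intro h
    by_cases hu : PySem.Chars.isupper c = true
    · exfalso
      have ht := pvToNat_lowerChar_upper c hu
      have h1 := (pvIsupper_iff c).mp hu
      rw [h] at ht
      have hd : ('-' : Char).toNat = 45 := by decide
      omega
    · rwa [pvLowerChar_fix c (Bool.eq_false_iff.mpr hu)] at h
  · intro h; subst h; decide

theorem pvCount_dash_lower (p : List Char) :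
    (PySem.Chars.lower p).count '-' = p.count '-' := by
  simp only [PySem.Chars.lower, List.count_eq_countP, List.countP_map]
  apply List.countP_congr
  intro c _
  simp [Function.comp, pvLowerChar_eq_dash_iff]

theorem pvSingleton_infix_iff (c : Char) (l : List Char) : [c] <:+: l ↔ c ∈ l := by
  constructor
  · intro h; exact h.subset (List.mem_singleton_self c)
  · intro h
    obtain ⟨s, t, rfl⟩ := List.append_of_mem h
    exact ⟨s, t, by simp⟩

-- port of A (_normalize_name_word), recursion on the '-'-split parts as in the Python
def pvNormA (s : List Char) : List Char :=
  let lowered := PySem.Chars.lower s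
  if pvConnA.contains lowered then lowered
  else if lowered.isEmpty then lowered
  else if PySem.Chars.isIn ['-'] lowered then
    PySem.Chars.join ['-'] ((PySem.Chars.splitOn lowered ['-']).attach.map (fun p => pvNormA p.1))
  else PySem.Chars.upper (PySem.Chars.slice lowered none (some 1)) ++ PySem.Chars.slice lowered (some 1) none
termination_by (PySem.Chars.lower s).count '-'
decreasing_by
  rename_i hin
  have hp : (p : List Char) ∈ pvChunks [] (PySem.Chars.lower s) := by
    rw [← pvSplitOn_dash]; exact p.2
  have hnd : '-' ∉ (p : List Char) := (pvChunks_mem _ [] (by simp) _ hp).1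
  have h0 : ((p : List Char).count '-') = 0 := List.count_eq_zero.mpr hnd
  have hmem : '-' ∈ PySem.Chars.lower s := by
    have := (PySem.Chars.isIn_iff_infix ['-'] (PySem.Chars.lower s)).mp hin
    exact (pvSingleton_infix_iff _ _).mp this
  have hpos : 0 < (PySem.Chars.lower s).count '-' := List.count_pos_iff.mpr hmem
  rw [pvCount_dash_lower]
  omega

def normalize_name_word_py (value : String) : String := String.ofList (pvNormA value.toList)

-- ===== PORT B =====
def pvConnB : List (List Char) := [['d','e'],['d','o'],['d','a'],['d','o','s'],['d','a','s'],['e']]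

-- port of B: same two whole-word guards, then one flat pass over the split parts
def pvNormB (s : List Char) : List Char :=
  let lowered := PySem.Chars.lower s
  if pvConnB.contains lowered then lowered
  else if lowered.isEmpty then lowered
  else
    PySem.Chars.join ['-'] ((PySem.Chars.splitOn lowered ['-']).map
      (fun p => if p.isEmpty || pvConnB.contains p then p
                else PySem.Chars.upper (PySem.Chars.slice p none (some 1)) ++ PySem.Chars.slice p (some 1) none))

def normalize_name_word_py_alt (value : String) : String := String.ofList (pvNormB value.toList)

-- ===== PRECONDITION & SPEC =====
def Spec_normalize_name_word_py (value : String) (out : String) : Prop := out = normalize_name_word_py_alt value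
instance (value : String) (out : String) : Decidable (Spec_normalize_name_word_py value out) := by unfold Spec_normalize_name_word_py; infer_instance

-- ===== CLAIM (what is proved, stated in full; the proofs are below) =====
def Claim_equal_normalize_name_word_py : Prop := ∀ (value : String), Dom_normalize_name_word_py value → Spec_normalize_name_word_py value (normalize_name_word_py value)

-- ===== LEMMAS AND PROOFS =====
theorem pvLowerChar_idem (c : Char) :
    PySem.Chars.lowerChar (PySem.Chars.lowerChar c) = PySem.Chars.lowerChar c := by
  by_cases h : PySem.Chars.isupper c = true
  · have ht := pvToNat_lowerChar_upper c h
    have h1 := (pvIsupper_iff c).mp h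
    apply pvLowerChar_fix
    rw [Bool.eq_false_iff, Ne, pvIsupper_iff, ht]
    omega
  · have hx := pvLowerChar_fix c (Bool.eq_false_iff.mpr h)
    rw [hx]; exact hx

theorem pvLower_fix_of_mem {c : Char} {s : List Char} (h : c ∈ PySem.Chars.lower s) :
    PySem.Chars.lowerChar c = c := by
  simp only [PySem.Chars.lower, List.mem_map] at h
  obtain ⟨d, _, rfl⟩ := h
  exact pvLowerChar_idem d

theorem pvLower_eq_self {p : List Char} (h : ∀ c ∈ p, PySem.Chars.lowerChar c = c) :
    PySem.Chars.lower p = p := by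
  simp only [PySem.Chars.lower]
  exact List.map_congr_left h |>.trans (List.map_id p)

theorem pvIsIn_dash_false {p : List Char} (h : '-' ∉ p) :
    PySem.Chars.isIn ['-'] p = false := by
  rw [PySem.Chars.isIn_eq_false_iff, pvSingleton_infix_iff]
  exact h

-- evaluating A's recursion at a part: already lowered, no '-', so it is B's per-part step
theorem pvNormA_part (p : List Char) (hnd : '-' ∉ p) (hlow : PySem.Chars.lower p = p) :
    pvNormA p = (if p.isEmpty || pvConnB.contains p then p
                 else PySem.Chars.upper (PySem.Chars.slice p none (some 1)) ++ PySem.Chars.slice p (some 1) none) := by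
  unfold pvNormA
  simp only [hlow]
  have hconn : pvConnA = pvConnB := rfl
  rw [hconn]
  by_cases hc : p ∈ pvConnB
  · simp [hc]
  · by_cases he : p = []
    · simp [he]
    · simp [hc, he, pvIsIn_dash_false hnd]

theorem pvChunks_no_dash : ∀ (l pre : List Char), '-' ∉ l → pvChunks pre l = [pre ++ l] := by
  intro l
  induction l with
  | nil => intro pre _; simp [pvChunks]
  | cons c rest ih =>
    intro pre h
    have hc : c ≠ '-' := fun hx => h (hx ▸ List.mem_cons_self ..)
    simp only [pvChunks, hc, if_false]
    rw [ih (pre ++ [c]) (fun hx => h (List.mem_cons_of_mem _ hx))]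
    simp

theorem pvNorm_eq (s : List Char) : pvNormA s = pvNormB s := by
  unfold pvNormA pvNormB
  simp only [List.attach_map_val]
  have hconn : pvConnA = pvConnB := rfl
  rw [hconn]
  by_cases hc : PySem.Chars.lower s ∈ pvConnB
  · simp [hc]
  · by_cases he : PySem.Chars.lower s = []
    · simp [he]
    · by_cases hin : PySem.Chars.isIn ['-'] (PySem.Chars.lower s) = true
      · simp only [hc, he, hin, if_true, if_false, Bool.or_eq_true, List.isEmpty_iff,
          List.contains_eq_mem, decide_eq_true_eq]
        congr 1
        apply List.map_congr_left
        intro p hp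
        rw [pvSplitOn_dash] at hp
        have hfacts := pvChunks_mem _ [] (by simp) p hp
        have hlow : PySem.Chars.lower p = p := by
          apply pvLower_eq_self
          intro c hcmem
          have := (hfacts.2 c hcmem).resolve_left (by simp)
          exact pvLower_fix_of_mem this
        rw [pvNormA_part p hfacts.1 hlow]
        simp
      · have hin' := Bool.eq_false_iff.mpr hin
        have hnd : '-' ∉ PySem.Chars.lower s := by
          intro hmem
          exact hin ((PySem.Chars.isIn_iff_infix _ _).mpr ((pvSingleton_infix_iff _ _).mpr hmem))
        rw [pvSplitOn_dash, pvChunks_no_dash _ [] hnd]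
        simp [hc, he, hin']

-- ===== VERDICT (by name: the statement is the Claim_ definition above) =====
theorem normalize_name_word_py_spec : Claim_equal_normalize_name_word_py := by
  intro value _
  unfold Spec_normalize_name_word_py normalize_name_word_py normalize_name_word_py_alt
  rw [pvNorm_eq]
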